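-- pv_equiv track=rewrite | github.com/udy11/coding-problems | project_euler/solved/073.py | cndvs
-- ===== SOURCE A (Python) =====
-- import math
--
-- def gcd(a, b):
--     while b != 0:
--         c = b
--         b = a % c
--         a = c
--     return a
--
-- def cndvs(n):
--     cndv = 0
--     n1 = math.floor(n/3)+1
--     n2 = math.ceil(n/2)
--     for i in range(n1, n2):
--         if gcd(i, n) == 1:
--             cndv += 1
--     return cndv
-- ===== SOURCE B (Python) =====
-- import math
--
-- def cndvs(n):
--     # Count integers i with n/3 < i < n/2 that are coprime to n, by
--     # inclusion-exclusion over the distinct prime factors of n: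
--     # no gcd per element -- O(sqrt(n) + 2^k) instead of A's O(n log n).
--     lo = n // 3 + 1          # first candidate: floor(n/3) + 1
--     hi = -((-n) // 2)        # exclusive end: ceil(n/2)
--     if hi <= lo:
--         return 0
--     # distinct prime factors of n by trial division (here n >= 5)
--     primes = []
--     m = n
--     d = 2
--     while d * d <= m:
--         if m % d == 0:
--             primes.append(d)
--             while m % d == 0:
--                 m //= d
--         d += 1
--     if m > 1:
--         primes.append(m)
--     # signed squarefree divisors: one (sign, product) per subset of primes
--     sdivs = [(1, 1)]
--     for p in primes:
--         sdivs += [(-s, q * p) for (s, q) in sdivs]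
--
--     def f(x):  # number of integers in [1, x] coprime to n
--         return sum(s * (x // q) for (s, q) in sdivs)
--
--     return f(hi - 1) - f(lo - 1)
-- ===== Notes on version B (the rewrite author's own statement) =====
-- stated objective: faster
-- what changed: Replaces the per-element Euclid-gcd scan over the whole interval (n/3, n/2) by inclusion-exclusion over the distinct prime factors of n (trial-division factorization once, then signed squarefree divisors count multiples in [1,x] by floor division).
import Mathlib
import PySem

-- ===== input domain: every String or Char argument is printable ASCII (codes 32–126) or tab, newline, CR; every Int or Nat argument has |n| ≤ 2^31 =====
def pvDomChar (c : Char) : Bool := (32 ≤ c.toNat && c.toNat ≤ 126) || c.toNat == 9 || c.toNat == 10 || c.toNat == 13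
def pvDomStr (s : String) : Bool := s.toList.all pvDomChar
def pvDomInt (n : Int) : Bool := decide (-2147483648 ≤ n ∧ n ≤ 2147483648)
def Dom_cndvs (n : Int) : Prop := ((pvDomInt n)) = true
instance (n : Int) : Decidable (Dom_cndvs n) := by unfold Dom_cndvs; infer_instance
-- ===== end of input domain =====

-- B replaces A's per-element Euclid-gcd scan of the interval (n/3, n/2) by inclusion-exclusion
-- over the distinct prime factors of n (objective: faster).

-- ===== PORT A =====

-- termination fact for the Euclid loop (cited by pyGcd's decreasing_by)
theorem pvModAbsLt (a b : Int) (hb : b ≠ 0) : (PySem.Int.mod a b).natAbs < b.natAbs := by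
  rcases lt_or_gt_of_ne hb with h | h
  · have h1 := PySem.Int.mod_neg_bounds a h
    omega
  · have h1 := PySem.Int.mod_nonneg a h
    have h2 := PySem.Int.mod_lt a h
    omega

-- while b != 0: c = b; b = a % c; a = c
def pyGcd (a b : Int) : Int :=
  if hb : b = 0 then a
  else pyGcd b (PySem.Int.mod a b)
termination_by b.natAbs
decreasing_by exact pvModAbsLt a b hb

-- math.floor(n/3) and math.ceil(n/2) are ported as exact floor/ceiling division: for |n| ≤ 2^31
-- the doubles n/3 and n/2 never round across an integer, so the float detour is value-identical.
def cndvs (n : Int) : Int :=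
  let n1 := PySem.Int.floordiv n 3 + 1
  let n2 := -(PySem.Int.floordiv (-n) 2)
  (PySem.List.pyRange n1 n2 1).foldl (fun cndv i => if pyGcd i n = 1 then cndv + 1 else cndv) 0

-- ===== PORT B =====

-- while m % d == 0: m //= d    (the `2 ≤ d ∧ 1 ≤ m` conjunct is a totality guard only;
-- it holds whenever cndvs_alt reaches this loop)
-- termination fact for the divide-out loop (cited by divOut's decreasing_by)
theorem pvDivOutDec (m d : Int) (h : PySem.Int.mod m d = 0 ∧ 2 ≤ d ∧ 1 ≤ m) :
    (PySem.Int.floordiv m d).natAbs < m.natAbs := by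
  have hd : (0:Int) < d := by omega
  have hmd : m * 2 ≤ m * d := mul_le_mul_of_nonneg_left (by omega) (by omega)
  have h1 : PySem.Int.floordiv m d < m := (PySem.Int.floordiv_lt_iff_lt_mul hd).mpr (by omega)
  have h2 : (0:Int) ≤ PySem.Int.floordiv m d := (PySem.Int.le_floordiv_iff_mul_le hd).mpr (by omega)
  omega

def divOut (m d : Int) : Int :=
  if h : PySem.Int.mod m d = 0 ∧ 2 ≤ d ∧ 1 ≤ m then
    divOut (PySem.Int.floordiv m d) d
  else m
termination_by m.natAbs
decreasing_by exact pvDivOutDec m d h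

-- bounds for divOut (cited by factorLoop's decreasing_by)
theorem divOut_le : ∀ (k : ℕ) (m d : Int), m.natAbs ≤ k → 1 ≤ m → divOut m d ≤ m ∧ 1 ≤ divOut m d := by
  intro k
  induction k with
  | zero => intro m d h hm; omega
  | succ k ih =>
    intro m d h hm
    rw [divOut]
    split
    · next hg =>
      have hd : (0:Int) < d := by omega
      have hdvd : d ∣ m := (PySem.Int.mod_eq_zero_iff_dvd m d).mp hg.1
      have hdm : d ≤ m := Int.le_of_dvd (by omega) hdvd
      have hmd : m * 2 ≤ m * d := mul_le_mul_of_nonneg_left (by omega) (by omega)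
      have h1 : 1 ≤ PySem.Int.floordiv m d := (PySem.Int.le_floordiv_iff_mul_le hd).mpr (by omega)
      have h2 : PySem.Int.floordiv m d < m := (PySem.Int.floordiv_lt_iff_lt_mul hd).mpr (by omega)
      have h3 := ih (PySem.Int.floordiv m d) d (by omega) h1
      constructor <;> omega
    · next => exact ⟨le_refl m, hm⟩

-- termination facts for the trial-division loop (cited by factorLoop's decreasing_by)
theorem pvFactorDec1 (m d : Int) (h : d * d ≤ m ∧ 2 ≤ d) :
    (divOut m d - (d + 1)).toNat < (m - d).toNat := by
  have hdd : 2 * d ≤ d * d := mul_le_mul_of_nonneg_right (by omega) (by omega)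
  have hm : (1:Int) ≤ m := by omega
  have h1 := divOut_le m.natAbs m d (le_refl _) hm
  omega

theorem pvFactorDec2 (m d : Int) (h : d * d ≤ m ∧ 2 ≤ d) :
    (m - (d + 1)).toNat < (m - d).toNat := by
  have hdd : 2 * d ≤ d * d := mul_le_mul_of_nonneg_right (by omega) (by omega)
  omega

-- trial-division loop collecting the distinct prime factors (the `2 ≤ d` conjunct is a totality
-- guard only; cndvs_alt always starts it at d = 2)
def factorLoop (m d : Int) : List Int :=
  if h : d * d ≤ m ∧ 2 ≤ d then
    if PySem.Int.mod m d = 0 then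
      d :: factorLoop (divOut m d) (d + 1)
    else
      factorLoop m (d + 1)
  else
    if 1 < m then [m] else []
termination_by (m - d).toNat
decreasing_by
  · exact pvFactorDec1 m d h
  · exact pvFactorDec2 m d h

def cndvs_alt (n : Int) : Int :=
  let lo := PySem.Int.floordiv n 3 + 1
  let hi := -(PySem.Int.floordiv (-n) 2)
  if hi ≤ lo then 0
  else
    let primes := factorLoop n 2
    let sdivs := primes.foldl
      (fun acc p => acc ++ acc.map (fun sq : Int × Int => (-sq.1, sq.2 * p))) [((1:Int), (1:Int))]
    let f : Int → Int := fun x => (sdivs.map (fun sq => sq.1 * PySem.Int.floordiv x sq.2)).sum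
    f (hi - 1) - f (lo - 1)

-- ===== PRECONDITION & SPEC =====
def Spec_cndvs (n : Int) (out : Int) : Prop := out = cndvs_alt n
instance (n : Int) (out : Int) : Decidable (Spec_cndvs n out) := by unfold Spec_cndvs; infer_instance

-- ===== CLAIM (what is proved, stated in full; the proofs are below) =====
def Claim_equal_cndvs : Prop := ∀ (n : Int), Dom_cndvs n → Spec_cndvs n (cndvs n)

-- ===== LEMMAS AND PROOFS =====

-- Python's Euclid loop computes Int.gcd on nonnegative inputs
theorem pvGcdEq : ∀ (k : ℕ) (a b : Int), b.natAbs ≤ k → 0 ≤ a → 0 ≤ b →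
    pyGcd a b = ((Int.gcd a b : ℕ) : ℤ) := by
  intro k
  induction k with
  | zero =>
    intro a b h ha hb
    have hb0 : b = 0 := by omega
    subst hb0
    rw [pyGcd]
    simp [Int.gcd, Int.natAbs_of_nonneg ha]
  | succ k ih =>
    intro a b h ha hb
    by_cases hb0 : b = 0
    · subst hb0
      rw [pyGcd]
      simp [Int.gcd, Int.natAbs_of_nonneg ha]
    · rw [pyGcd, dif_neg hb0]
      have hbpos : (0:Int) < b := by omega
      rw [PySem.Int.mod_eq_emod_of_pos hbpos]
      have h1 : 0 ≤ a % b := Int.emod_nonneg a hb0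
      have h2 : (a % b).natAbs ≤ k := by
        have := Int.emod_lt_of_pos a hbpos
        omega
      rw [ih b (a % b) h2 (le_of_lt hbpos) h1]
      congr 1
      obtain ⟨A, rfl⟩ : ∃ A : ℕ, a = (A : ℤ) := ⟨a.toNat, by omega⟩
      obtain ⟨B, rfl⟩ : ∃ B : ℕ, b = (B : ℤ) := ⟨b.toNat, by omega⟩
      have hmod : (A : ℤ) % (B : ℤ) = ((A % B : ℕ) : ℤ) := by push_cast; ring
      rw [hmod]
      simp only [Int.gcd_natCast_natCast]
      rw [Nat.gcd_comm B, ← Nat.gcd_rec, Nat.gcd_comm]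

-- properties of divOut: it divides m, stays ≥ 1, removes every factor d, and keeps any prime
-- factor of m that does not divide d
theorem pvDivOutProps : ∀ (k : ℕ) (m d : Int), m.natAbs ≤ k → 2 ≤ d → 1 ≤ m →
    (divOut m d ∣ m ∧ 1 ≤ divOut m d ∧ ¬ d ∣ divOut m d ∧
      ∀ q : Int, Prime q → q ∣ m → ¬ q ∣ d → q ∣ divOut m d) := by
  intro k
  induction k with
  | zero => intro m d h hd hm; omega
  | succ k ih =>
    intro m d h hd hm
    rw [divOut]
    split
    · next hg =>
      have hdpos : (0:Int) < d := by omega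
      have hdvd : d ∣ m := (PySem.Int.mod_eq_zero_iff_dvd m d).mp hg.1
      have hdm : d ≤ m := Int.le_of_dvd (by omega) hdvd
      have hmod0 := PySem.Int.floordiv_mul_add_mod m d
      have hmul : PySem.Int.floordiv m d * d = m := by
        rw [hg.1] at hmod0; omega
      have h1 : 1 ≤ PySem.Int.floordiv m d := (PySem.Int.le_floordiv_iff_mul_le hdpos).mpr (by omega)
      have h2 : PySem.Int.floordiv m d < m := (PySem.Int.floordiv_lt_iff_lt_mul hdpos).mpr (by nlinarith)
      obtain ⟨ha, hb, hc, hpre⟩ := ih (PySem.Int.floordiv m d) d (by omega) hd h1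
      refine ⟨dvd_trans ha ⟨d, hmul.symm⟩, hb, hc, ?_⟩
      intro q hq hqm hqd
      have hq' : q ∣ PySem.Int.floordiv m d := by
        have hmm : q ∣ d * PySem.Int.floordiv m d := by
          rw [mul_comm, hmul]; exact hqm
        rcases hq.dvd_or_dvd hmm with h | h
        · exact absurd h hqd
        · exact h
      exact hpre q hq hq' hqd
    · next hg =>
      have hnd : ¬ d ∣ m := by
        intro hdm
        exact hg ⟨(PySem.Int.mod_eq_zero_iff_dvd m d).mpr hdm, hd, hm⟩
      exact ⟨dvd_rfl, hm, hnd, fun q _ hqm _ => hqm⟩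

-- the tail of the trial-division loop: no candidate below sqrt(m) remained, so m > 1 is prime
theorem pvFactorBase (m d : Int) (hd : 2 ≤ d) (hm : 1 ≤ m)
    (hmin : ∀ q : Int, Prime q → 0 < q → q ∣ m → d ≤ q) (hstop : ¬ d * d ≤ m) :
    (∀ p ∈ (if 1 < m then [m] else ([] : List Int)), d ≤ p ∧ Prime p ∧ p ∣ m) ∧
    (∀ q : Int, Prime q → 0 < q → q ∣ m → q ∈ (if 1 < m then [m] else ([] : List Int))) ∧
    (if 1 < m then [m] else ([] : List Int)).Pairwise (· < ·) := by
  split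
  · next h1m =>
    have hmprime : Prime m := by
      by_contra hmp
      have hnotnat : ¬ Nat.Prime m.natAbs := fun hx => hmp (Int.prime_iff_natAbs_prime.mpr hx)
      have hpos : 0 < m.natAbs := by omega
      have hsq := Nat.minFac_sq_le_self hpos hnotnat
      set pf := m.natAbs.minFac with hpf
      have hpp : Nat.Prime pf := Nat.minFac_prime (by omega : m.natAbs ≠ 1)
      have hpdvd : (pf : ℤ) ∣ m := by
        have h1 : (pf : ℤ) ∣ (m.natAbs : ℤ) := Int.natCast_dvd_natCast.mpr (Nat.minFac_dvd _)
        rwa [Int.natAbs_of_nonneg (by omega)] at h1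
      have hppZ : Prime (pf : ℤ) := Int.prime_iff_natAbs_prime.mpr (by simpa using hpp)
      have hgd : d ≤ (pf : ℤ) := hmin _ hppZ (by exact_mod_cast hpp.pos) hpdvd
      have hple : ((pf^2 : ℕ) : ℤ) ≤ m := by
        have h2 := Int.ofNat_le.mpr hsq
        rwa [Int.natAbs_of_nonneg (by omega)] at h2
      have hcon : d * d ≤ m := by
        have h0d : (0:ℤ) ≤ d := by omega
        have h3 : d * d ≤ (pf:ℤ) * (pf:ℤ) := mul_le_mul hgd hgd h0d (le_trans h0d hgd)
        push_cast at hple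
        nlinarith
      exact hstop hcon
    refine ⟨?_, ?_, ?_⟩
    · intro p hp
      rw [List.mem_singleton] at hp
      rw [hp]
      exact ⟨hmin m hmprime (by omega) dvd_rfl, hmprime, dvd_rfl⟩
    · intro q hq hqpos hqm
      have hassoc := hq.associated_of_dvd hmprime hqm
      rcases Int.associated_iff.mp hassoc with h | h
      · simp [h]
      · omega
    · simp
  · next h1m =>
    have hm1 : m = 1 := by omega
    subst hm1
    refine ⟨by simp, ?_, by simp⟩
    intro q hq hqpos hqm
    have := Int.le_of_dvd (by omega) hqm
    have h2 : 2 ≤ q.natAbs := (Int.prime_iff_natAbs_prime.mp hq).two_le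
    omega

-- full specification of the trial-division loop
theorem pvFactorProps : ∀ (k : ℕ) (m d : Int), (m - d).toNat ≤ k → 2 ≤ d → 1 ≤ m →
    (∀ q : Int, Prime q → 0 < q → q ∣ m → d ≤ q) →
    (∀ p ∈ factorLoop m d, d ≤ p ∧ Prime p ∧ p ∣ m) ∧
    (∀ q : Int, Prime q → 0 < q → q ∣ m → q ∈ factorLoop m d) ∧
    (factorLoop m d).Pairwise (· < ·) := by
  intro k
  induction k with
  | zero =>
    intro m d hfuel hd hm hmin
    rw [factorLoop]
    split
    · next hg =>
      exfalso
      have : 2 * d ≤ d * d := by nlinarith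
      omega
    · next hg =>
      have hstop : ¬ d * d ≤ m := fun hx => hg ⟨hx, hd⟩
      exact pvFactorBase m d hd hm hmin hstop
  | succ k ih =>
    intro m d hfuel hd hm hmin
    rw [factorLoop]
    split
    · next hg =>
      have hdd : 2 * d ≤ d * d := by nlinarith
      have hdpos : (0:ℤ) < d := by omega
      split
      · next hmod =>
        -- d divides m: d is prime, strip it out, recurse
        have hdvd : d ∣ m := (PySem.Int.mod_eq_zero_iff_dvd m d).mp hmod
        have hdprime : Prime d := by
          have hnd : 2 ≤ d.natAbs := by omega
          have hqp : Nat.Prime d.natAbs.minFac := Nat.minFac_prime (by omega : d.natAbs ≠ 1)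
          have hqdvd : (d.natAbs.minFac : ℤ) ∣ d := by
            have h1 : (d.natAbs.minFac : ℤ) ∣ (d.natAbs : ℤ) :=
              Int.natCast_dvd_natCast.mpr (Nat.minFac_dvd _)
            rwa [Int.natAbs_of_nonneg (by omega)] at h1
          have hqm : (d.natAbs.minFac : ℤ) ∣ m := dvd_trans hqdvd hdvd
          have hqprime : Prime ((d.natAbs.minFac : ℤ)) :=
            Int.prime_iff_natAbs_prime.mpr (by simpa using hqp)
          have hge : d ≤ (d.natAbs.minFac : ℤ) := hmin _ hqprime (by exact_mod_cast hqp.pos) hqm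
          have hle : (d.natAbs.minFac : ℤ) ≤ d := Int.le_of_dvd (by omega) hqdvd
          have heq : d.natAbs.minFac = d.natAbs := by omega
          exact Int.prime_iff_natAbs_prime.mpr (heq ▸ hqp)
        obtain ⟨hm'dvd, hm'pos, hm'nd, hm'keep⟩ :=
          pvDivOutProps m.natAbs m d (le_refl _) hd hm
        have hm'le : divOut m d ≤ m := Int.le_of_dvd (by omega) hm'dvd
        have hmin' : ∀ q : Int, Prime q → 0 < q → q ∣ divOut m d → d + 1 ≤ q := by
          intro q hq hqpos hqm'
          have hqm : q ∣ m := dvd_trans hqm' hm'dvd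
          have hle := hmin q hq hqpos hqm
          rcases eq_or_lt_of_le hle with h | h
          · exact absurd (h ▸ hqm') hm'nd
          · omega
        obtain ⟨hsnd, hcmp, hpar⟩ := ih (divOut m d) (d + 1) (by omega) (by omega) hm'pos hmin'
        refine ⟨?_, ?_, ?_⟩
        · intro p hp
          rcases List.mem_cons.mp hp with h | h
          · rw [h]; exact ⟨le_refl d, hdprime, hdvd⟩
          · obtain ⟨h1, h2, h3⟩ := hsnd p h
            exact ⟨by omega, h2, dvd_trans h3 hm'dvd⟩
        · intro q hq hqpos hqm
          by_cases hqd : q = d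
          · rw [hqd]; simp
          · have hnotqd : ¬ q ∣ d := by
              intro hdvdq
              have hx1 : q ≤ d := Int.le_of_dvd (by omega) hdvdq
              have hx2 : d ≤ q := hmin q hq hqpos hqm
              exact hqd (by omega)
            have hmem : q ∣ divOut m d := hm'keep q hq hqm hnotqd
            exact List.mem_cons_of_mem d (hcmp q hq hqpos hmem)
        · rw [List.pairwise_cons]
          refine ⟨fun p hp => ?_, hpar⟩
          have := (hsnd p hp).1
          omega
      · next hmod =>
        -- d does not divide m: move on to d + 1
        have hnd : ¬ d ∣ m := fun hx => hmod ((PySem.Int.mod_eq_zero_iff_dvd m d).mpr hx)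
        have hmin' : ∀ q : Int, Prime q → 0 < q → q ∣ m → d + 1 ≤ q := by
          intro q hq hqpos hqm
          have hle := hmin q hq hqpos hqm
          rcases eq_or_lt_of_le hle with h | h
          · exact absurd (h ▸ hqm) hnd
          · omega
        obtain ⟨hsnd, hcmp, hpar⟩ := ih m (d + 1) (by omega) (by omega) hm hmin'
        refine ⟨fun p hp => ?_, hcmp, hpar⟩
        obtain ⟨h1, h2, h3⟩ := hsnd p hp
        exact ⟨by omega, h2, h3⟩
    · next hg =>
      have hstop : ¬ d * d ≤ m := fun hx => hg ⟨hx, hd⟩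
      exact pvFactorBase m d hd hm hmin hstop

-- the signed-squarefree-divisor list of B, and its signed sum
def pvSdivs (P : List Int) : List (Int × Int) :=
  P.foldl (fun acc p => acc ++ acc.map (fun sq : Int × Int => (-sq.1, sq.2 * p))) [((1:Int), (1:Int))]

def pvF (P : List Int) (x : Int) : Int :=
  ((pvSdivs P).map (fun sq => sq.1 * PySem.Int.floordiv x sq.2)).sum

theorem pvSdivs_append (P : List Int) (p : Int) :
    pvSdivs (P ++ [p]) = pvSdivs P ++ (pvSdivs P).map (fun sq => (-sq.1, sq.2 * p)) := by
  unfold pvSdivs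
  rw [List.foldl_append]
  rfl

theorem pvSdivs_snd_pos : ∀ (P : List Int), (∀ p ∈ P, 1 ≤ p) → ∀ sq ∈ pvSdivs P, 1 ≤ sq.2 := by
  intro P
  induction P using List.reverseRecOn with
  | nil =>
    intro _ sq hsq
    simp only [pvSdivs, List.foldl_nil, List.mem_singleton] at hsq
    subst hsq; norm_num
  | append_singleton P p ihp =>
    intro hup sq hsq
    rw [pvSdivs_append] at hsq
    have hP : ∀ q ∈ P, 1 ≤ q := fun q hq => hup q (List.mem_append_left _ hq)
    have hp : 1 ≤ p := hup p (List.mem_append_right _ (List.mem_singleton_self p))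
    rcases List.mem_append.mp hsq with h | h
    · exact ihp hP sq h
    · rcases List.mem_map.mp h with ⟨sq', hsq', rfl⟩
      have := ihp hP sq' hsq'
      simp only
      nlinarith

theorem pvSumNeg (l : List (Int × Int)) (f : Int × Int → Int) :
    (l.map (fun sq => -(f sq))).sum = -((l.map f).sum) := by
  induction l with
  | nil => simp
  | cons a t ih =>
    simp only [List.map_cons, List.sum_cons, ih]
    ring

theorem pvF_append (P : List Int) (p : Int) (hp : 1 ≤ p) (hP : ∀ q ∈ P, 1 ≤ q) (x : Int) :
    pvF (P ++ [p]) x = pvF P x - pvF P (PySem.Int.floordiv x p) := by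
  unfold pvF
  rw [pvSdivs_append, List.map_append, List.sum_append, List.map_map]
  have hcong : ∀ sq ∈ pvSdivs P,
      ((fun sq : Int × Int => sq.1 * PySem.Int.floordiv x sq.2) ∘
        (fun sq : Int × Int => (-sq.1, sq.2 * p))) sq
      = -(sq.1 * PySem.Int.floordiv (PySem.Int.floordiv x p) sq.2) := by
    intro sq hsq
    have h2 : (1:ℤ) ≤ sq.2 := pvSdivs_snd_pos P (fun q hq => by have := hP q hq; omega) sq hsq
    have hdd : PySem.Int.floordiv x (sq.2 * p) = PySem.Int.floordiv (PySem.Int.floordiv x p) sq.2 := by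
      rw [PySem.Int.floordiv_eq_ediv_of_pos (by nlinarith : (0:ℤ) < sq.2 * p),
          PySem.Int.floordiv_eq_ediv_of_pos (by omega : (0:ℤ) < p),
          PySem.Int.floordiv_eq_ediv_of_pos (by omega : (0:ℤ) < sq.2),
          mul_comm sq.2 p, Int.ediv_ediv_of_nonneg (by omega)]
    simp only [Function.comp]
    rw [hdd]; ring
  rw [List.map_congr_left hcong]
  rw [pvSumNeg (pvSdivs P) (fun sq : Int × Int =>
    sq.1 * PySem.Int.floordiv (PySem.Int.floordiv x p) sq.2)]
  ring

-- the number of integers in [1, x] avoiding every divisor in P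
def pvCnt (P : List ℕ) (x : ℕ) : ℕ :=
  ((Finset.Icc 1 x).filter (fun i => ∀ p ∈ P, ¬ p ∣ i)).card

-- the partition step of inclusion-exclusion (multiples of p in bijection with [1, x/p])
theorem pvCnt_step (P : List ℕ) (p x : ℕ) (hp : 1 ≤ p) (hcop : ∀ q ∈ P, Nat.Coprime q p) :
    pvCnt (P ++ [p]) x + pvCnt P (x / p) = pvCnt P x := by
  have hsplit := Finset.card_filter_add_card_filter_not
    (s := (Finset.Icc 1 x).filter (fun i => ∀ q ∈ P, ¬ q ∣ i)) (fun i => p ∣ i)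
  rw [Finset.filter_filter, Finset.filter_filter] at hsplit
  have h1 : pvCnt (P ++ [p]) x
      = ((Finset.Icc 1 x).filter (fun i => (∀ q ∈ P, ¬ q ∣ i) ∧ ¬ p ∣ i)).card := by
    unfold pvCnt
    congr 1
    apply Finset.filter_congr
    intro i _
    simp only [List.mem_append, List.mem_singleton]
    constructor
    · intro h
      exact ⟨fun q hq => h q (Or.inl hq), h p (Or.inr rfl)⟩
    · rintro ⟨ha, hb⟩ q hq
      rcases hq with hq | rfl
      · exact ha q hq
      · exact hb
  have h2 : ((Finset.Icc 1 x).filter (fun i => (∀ q ∈ P, ¬ q ∣ i) ∧ p ∣ i)).card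
      = pvCnt P (x / p) := by
    unfold pvCnt
    apply Finset.card_nbij' (fun i => i / p) (fun j => p * j)
    · intro i hi
      simp only [Finset.coe_filter, Set.mem_setOf_eq, Finset.mem_Icc] at hi ⊢
      obtain ⟨⟨hi1, hi2⟩, hQ, hpd⟩ := hi
      refine ⟨⟨?_, Nat.div_le_div_right hi2⟩, ?_⟩
      · have := Nat.le_of_dvd (by omega) hpd
        exact (Nat.one_le_div_iff (by omega)).mpr this
      · intro q hq hqd
        have hiq : q ∣ i := by
          have hmc := Nat.mul_div_cancel' hpd
          calc q ∣ p * (i / p) := Dvd.dvd.mul_left hqd p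
            _ = i := hmc
        exact hQ q hq hiq
    · intro j hj
      simp only [Finset.coe_filter, Set.mem_setOf_eq, Finset.mem_Icc] at hj ⊢
      obtain ⟨⟨hj1, hj2⟩, hQ⟩ := hj
      refine ⟨⟨Nat.mul_pos (by omega) (by omega), ?_⟩, ?_, dvd_mul_right p j⟩
      · calc p * j ≤ p * (x / p) := Nat.mul_le_mul_left p hj2
          _ ≤ x := Nat.mul_div_le x p
      · intro q hq hqd
        have hqj : q ∣ j := (hcop q hq).dvd_of_dvd_mul_left hqd
        exact hQ q hq hqj
    · intro i hi
      simp only [Finset.coe_filter, Set.mem_setOf_eq, Finset.mem_Icc] at hi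
      exact Nat.mul_div_cancel' hi.2.2
    · intro j hj
      exact Nat.mul_div_cancel_left j (by omega)
  rw [h1, ← h2, Nat.add_comm, hsplit]
  rfl

-- splitting the count at an interval boundary
theorem pvCnt_split (P : List ℕ) (a b : ℕ) (h1 : 1 ≤ a) (h2 : a ≤ b) :
    pvCnt P (b - 1) = pvCnt P (a - 1)
      + ((Finset.Ico a b).filter (fun i => ∀ p ∈ P, ¬ p ∣ i)).card := by
  have hunion : Finset.Icc 1 (b - 1) = Finset.Icc 1 (a - 1) ∪ Finset.Ico a b := by
    ext i
    simp only [Finset.mem_Icc, Finset.mem_union, Finset.mem_Ico]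
    omega
  have hdisj : Disjoint (Finset.Icc 1 (a - 1)) (Finset.Ico a b) := by
    rw [Finset.disjoint_left]
    intro i hi hi'
    simp only [Finset.mem_Icc] at hi
    simp only [Finset.mem_Ico] at hi'
    omega
  unfold pvCnt
  rw [hunion, Finset.filter_union,
    Finset.card_union_of_disjoint (Finset.disjoint_filter_filter hdisj)]

-- counting over a shifted List.range equals counting over the Finset interval
theorem pvCountRange (a : ℕ) (Q : ℕ → Prop) [DecidablePred Q] :
    ∀ len : ℕ, (List.range len).countP (fun k => decide (Q (a + k)))
      = ((Finset.Ico a (a + len)).filter Q).card := by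
  intro len
  induction len with
  | zero => simp
  | succ k ihl =>
    rw [List.range_succ, List.countP_append, ihl]
    have hIco : Finset.Ico a (a + (k + 1)) = insert (a + k) (Finset.Ico a (a + k)) := by
      ext i
      simp only [Finset.mem_Ico, Finset.mem_insert]
      omega
    rw [hIco, Finset.filter_insert]
    by_cases hQ : Q (a + k)
    · rw [if_pos hQ, Finset.card_insert_of_notMem (by simp)]
      simp [hQ]
    · rw [if_neg hQ]
      simp [hQ]

-- inclusion-exclusion: B's signed sum counts the integers in [1, x] avoiding every prime in P
theorem pvIE : ∀ (P : List Int), (∀ p ∈ P, 2 ≤ p) →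
    List.Pairwise (fun a b => Nat.Coprime a.toNat b.toNat) P →
    ∀ x : ℕ, pvF P (x : ℤ) = ((pvCnt (P.map Int.toNat) x : ℕ) : ℤ) := by
  intro P
  induction P using List.reverseRecOn with
  | nil =>
    intro _ _ x
    unfold pvF pvSdivs pvCnt
    simp only [List.foldl_nil, List.map_cons, List.map_nil, List.sum_cons, List.sum_nil]
    rw [PySem.Int.floordiv_eq_ediv_of_pos (by norm_num), Int.ediv_one]
    rw [Finset.filter_true_of_mem (by intro i _; simp)]
    simp [Nat.card_Icc]
  | append_singleton P p ihp =>
    intro h2 hcop x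
    have hp2 : 2 ≤ p := h2 p (List.mem_append_right _ (List.mem_singleton_self p))
    have hP2 : ∀ q ∈ P, 2 ≤ q := fun q hq => h2 q (List.mem_append_left _ hq)
    obtain ⟨hPcop, _, hrel⟩ := List.pairwise_append.mp hcop
    have hcops : ∀ q ∈ P, Nat.Coprime q.toNat p.toNat :=
      fun q hq => hrel q hq p (List.mem_singleton_self p)
    rw [pvF_append P p (by omega) (fun q hq => by have := hP2 q hq; omega)]
    have hxp : PySem.Int.floordiv (x : ℤ) p = ((x / p.toNat : ℕ) : ℤ) := by
      have hpn := PySem.Int.floordiv_natCast x p.toNat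
      rwa [show ((p.toNat : ℕ) : ℤ) = p by omega] at hpn
    rw [hxp, ihp hP2 hPcop x, ihp hP2 hPcop (x / p.toNat)]
    have hstep := pvCnt_step (P.map Int.toNat) p.toNat x (by omega)
      (by
        intro q hq
        rcases List.mem_map.mp hq with ⟨a, ha, rfl⟩
        exact hcops a ha)
    rw [List.map_append, List.map_singleton]
    omega

-- a number is coprime to N iff it avoids every prime factor of N
theorem pvChar (PN : List ℕ) (N : ℕ) (hN : 2 ≤ N)
    (hsound : ∀ p ∈ PN, Nat.Prime p ∧ p ∣ N)
    (hcompl : ∀ q : ℕ, Nat.Prime q → q ∣ N → q ∈ PN) (i : ℕ) :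
    Nat.gcd i N = 1 ↔ ∀ p ∈ PN, ¬ p ∣ i := by
  constructor
  · intro h p hp hpi
    obtain ⟨hpp, hpN⟩ := hsound p hp
    have hg : p ∣ Nat.gcd i N := Nat.dvd_gcd hpi hpN
    rw [h] at hg
    exact hpp.one_lt.ne' (Nat.dvd_one.mp hg)
  · intro h
    by_contra hg
    obtain ⟨q, hq, hqi, hqN⟩ := Nat.Prime.not_coprime_iff_dvd.mp hg
    exact h q (hcompl q hq hqN) hqi

-- the main equivalence
theorem pvMain (n : Int) : cndvs n = cndvs_alt n := by
  classical
  set lo := PySem.Int.floordiv n 3 + 1 with hlo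
  set hi := -PySem.Int.floordiv (-n) 2 with hhi
  have hf3 := PySem.Int.floordiv_mul_add_mod n 3
  have h3a := PySem.Int.mod_nonneg n (by norm_num : (0:ℤ) < 3)
  have h3b := PySem.Int.mod_lt n (by norm_num : (0:ℤ) < 3)
  have hf2 := PySem.Int.floordiv_mul_add_mod (-n) 2
  have h2a := PySem.Int.mod_nonneg (-n) (by norm_num : (0:ℤ) < 2)
  have h2b := PySem.Int.mod_lt (-n) (by norm_num : (0:ℤ) < 2)
  by_cases hle : hi ≤ lo
  · -- empty interval on both sides
    have hA : cndvs n = 0 := by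
      simp only [cndvs]
      rw [← hlo, ← hhi, PySem.List.pyRange_one_eq_nil hle, List.foldl_nil]
    have hB : cndvs_alt n = 0 := by
      simp only [cndvs_alt]
      rw [← hlo, ← hhi, if_pos hle]
    rw [hA, hB]
  · rw [not_le] at hle
    have hn5 : 5 ≤ n := by omega
    have hlo2 : 2 ≤ lo := by omega
    have hhin : hi ≤ n := by omega
    -- the factor list of n and its properties
    obtain ⟨hsound, hcompl, hpair⟩ := pvFactorProps (n - 2).toNat n 2 (le_refl _)
      (by norm_num) (by omega)
      (fun q hq hqpos _ => by
        have h := Int.prime_iff_natAbs_prime.mp hq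
        have := h.two_le
        omega)
    set P := factorLoop n 2 with hP
    set PN := P.map Int.toNat with hPN
    set N := n.toNat
    have hsoundN : ∀ p ∈ PN, Nat.Prime p ∧ p ∣ N := by
      intro p' hp'
      rcases List.mem_map.mp hp' with ⟨p, hpP, rfl⟩
      obtain ⟨hdp, hprime, hdvd⟩ := hsound p hpP
      constructor
      · have h := Int.prime_iff_natAbs_prime.mp hprime
        rwa [show p.natAbs = p.toNat by omega] at h
      · have h : ((p.toNat : ℕ) : ℤ) ∣ ((N : ℕ) : ℤ) := by
          rw [show ((p.toNat : ℕ) : ℤ) = p by omega, show ((N : ℕ) : ℤ) = n by omega]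
          exact hdvd
        exact_mod_cast h
    have hcomplN : ∀ q : ℕ, Nat.Prime q → q ∣ N → q ∈ PN := by
      intro q hq hdvd
      have hq2 := hq.two_le
      have hqZ : Prime ((q : ℕ) : ℤ) := Int.prime_iff_natAbs_prime.mpr (by simpa using hq)
      have hdvdZ : ((q : ℕ) : ℤ) ∣ n := by
        have h : ((q : ℕ) : ℤ) ∣ ((N : ℕ) : ℤ) := Int.natCast_dvd_natCast.mpr hdvd
        rwa [show ((N : ℕ) : ℤ) = n by omega] at h
      have hmem := hcompl ((q : ℕ) : ℤ) hqZ (by exact_mod_cast Nat.pos_of_ne_zero (by omega)) hdvdZ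
      exact List.mem_map.mpr ⟨((q : ℕ) : ℤ), hmem, by simp⟩
    have hall2 : ∀ p ∈ P, 2 ≤ p := fun p hp => (hsound p hp).1
    have hcoppair : List.Pairwise (fun a b => Nat.Coprime a.toNat b.toNat) P := by
      refine hpair.imp_of_mem ?_
      intro a b ha hb hab
      have hpa := (hsoundN a.toNat (List.mem_map.mpr ⟨a, ha, rfl⟩)).1
      have hpb := (hsoundN b.toNat (List.mem_map.mpr ⟨b, hb, rfl⟩)).1
      have ha2 := hall2 a ha
      have hb2 := hall2 b hb
      exact (Nat.coprime_primes hpa hpb).mpr (by omega)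
    -- evaluate B
    have hBval : cndvs_alt n = pvF P (hi - 1) - pvF P (lo - 1) := by
      simp only [cndvs_alt]
      rw [← hlo, ← hhi, if_neg (not_le.mpr hle)]
      rfl
    -- evaluate A
    have hfun : (fun (c : Int) (i : Int) => if pyGcd i n = 1 then c + 1 else c)
        = (fun c i => if (decide (pyGcd i n = 1)) = true then c + 1 else c) := by
      funext c i
      simp
    have hAval : cndvs n
        = 0 + (((PySem.List.pyRange lo hi 1).countP (fun i => decide (pyGcd i n = 1)) : ℕ) : ℤ) := by
      simp only [cndvs]
      rw [← hlo, ← hhi, hfun, PySem.List.foldl_count_if]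
    -- the two predicates agree on the interval
    have hbridge : ∀ k ∈ List.range (hi - lo).toNat,
        ((fun i => decide (pyGcd i n = 1)) ∘ fun k : ℕ => lo + (k : ℤ)) k = true
          ↔ (fun k : ℕ => decide ((fun i => ∀ p ∈ PN, ¬ p ∣ i) (lo.toNat + k))) k = true := by
      intro k hk
      rw [List.mem_range] at hk
      simp only [Function.comp_apply, decide_eq_true_eq]
      have hipos : (0:ℤ) ≤ lo + (k : ℤ) := by omega
      rw [pvGcdEq n.natAbs (lo + (k : ℤ)) n (le_refl _) hipos (by omega)]
      have hgcdnat : Int.gcd (lo + (k : ℤ)) n = Nat.gcd (lo + (k : ℤ)).toNat N := by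
        unfold Int.gcd
        congr 1 <;> omega
      have htoNat : (lo + (k : ℤ)).toNat = lo.toNat + k := by omega
      rw [show (((Int.gcd (lo + (k : ℤ)) n : ℕ) : ℤ) = 1) ↔ Int.gcd (lo + (k : ℤ)) n = 1 by omega,
        hgcdnat, htoNat]
      exact pvChar PN N (by omega) hsoundN hcomplN (lo.toNat + k)
    -- chain everything together
    rw [hAval, hBval]
    rw [PySem.List.pyRange_one lo hi, List.countP_map]
    rw [List.countP_congr hbridge]
    rw [pvCountRange lo.toNat (fun i => ∀ p ∈ PN, ¬ p ∣ i) ((hi - lo).toNat)]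
    have hup : lo.toNat + (hi - lo).toNat = hi.toNat := by omega
    rw [hup]
    have he1 : hi - 1 = ((hi.toNat - 1 : ℕ) : ℤ) := by omega
    have he2 : lo - 1 = ((lo.toNat - 1 : ℕ) : ℤ) := by omega
    rw [he1, he2, pvIE P hall2 hcoppair (hi.toNat - 1), pvIE P hall2 hcoppair (lo.toNat - 1)]
    have hsplit := pvCnt_split PN lo.toNat hi.toNat (by omega) (by omega)
    rw [← hPN]
    omega

-- ===== VERDICT (by name: the statement is the Claim_ definition above) =====
theorem cndvs_spec : Claim_equal_cndvs := by
  intro n _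
  show cndvs n = cndvs_alt n
  exact pvMain n
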